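-- pv_equiv track=rewrite | github.com/teeradon43/Data_Structure | Lab/lab54.py | solveFormular
-- ===== SOURCE A (Python) =====
-- def solveFormular(List,index,count):
--     if count == 0:
--         return 1, 0
--     s, b = solveFormular(List, index + 1, count // 2)
--
--     if count % 2 == 1:
--         s *= int(List[index].split()[0]);
--         b += int(List[index].split()[1]);
--
--     return s, b
-- ===== SOURCE B (Python) =====
-- def solveFormular(List, index, count):
--     s, b = 1, 0
--     i = index
--     while count > 0:
--         if count % 2 == 1:
--             parts = List[i].split()
--             s *= int(parts[0])
--             b += int(parts[1])
--         count //= 2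
--         i += 1
--     return s, b
-- ===== Notes on version B (the rewrite author's own statement) =====
-- stated objective: simpler
-- what changed: Replaced the halving recursion (which multiplies/adds on the way back up) by a single iterative while-loop over the bits of count with running accumulators s and b.
import Mathlib
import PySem

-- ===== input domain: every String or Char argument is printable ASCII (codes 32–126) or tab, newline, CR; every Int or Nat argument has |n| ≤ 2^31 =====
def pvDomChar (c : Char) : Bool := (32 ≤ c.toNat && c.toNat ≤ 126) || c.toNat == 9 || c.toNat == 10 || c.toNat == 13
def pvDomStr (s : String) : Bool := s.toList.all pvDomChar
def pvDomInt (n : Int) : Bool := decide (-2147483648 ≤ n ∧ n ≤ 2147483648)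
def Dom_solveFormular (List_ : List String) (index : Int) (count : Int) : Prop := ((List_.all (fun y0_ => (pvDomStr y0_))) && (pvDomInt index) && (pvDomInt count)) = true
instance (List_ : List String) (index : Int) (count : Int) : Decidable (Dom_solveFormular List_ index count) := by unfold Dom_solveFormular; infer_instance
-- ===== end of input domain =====

-- B replaces A's halving recursion by one iterative loop over the bits of count (same values, constant stack);
-- the proved equivalence is about return values on Pre_ (which requires 0 ≤ count; A recurses forever for negative count).

-- ===== PORT A =====
-- int(List_[index].split()[k]); under Pre_ every lookup/parse succeeds, so the getD defaults are never taken
def pvTok (List_ : List String) (i : Int) (k : Int) : Int :=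
  (PySem.Int.ofStr? (PySem.List.pyGetD (PySem.Str.split₀ (PySem.List.pyGetD List_ i "")) k "")).getD 0

def solveFormular (List_ : List String) (index : Int) (count : Int) : Int × Int :=
  if count = 0 then (1, 0)
  else if count < 0 then (1, 0)   -- Python recurses forever here (outside Pre_); totality guard only
  else
    let sb := solveFormular List_ (index + 1) (PySem.Int.floordiv count 2)
    if PySem.Int.mod count 2 = 1 then
      (sb.1 * pvTok List_ index 0, sb.2 + pvTok List_ index 1)
    else sb
termination_by count.toNat
decreasing_by
  rw [PySem.Int.floordiv_eq_ediv_of_pos (by omega)]; omega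

-- ===== PORT B =====
def pvLoop (List_ : List String) (s b i count : Int) : Int × Int :=
  if count > 0 then
    if PySem.Int.mod count 2 = 1 then
      pvLoop List_ (s * pvTok List_ i 0) (b + pvTok List_ i 1) (i + 1) (PySem.Int.floordiv count 2)
    else
      pvLoop List_ s b (i + 1) (PySem.Int.floordiv count 2)
  else (s, b)
termination_by count.toNat
decreasing_by
  · rw [PySem.Int.floordiv_eq_ediv_of_pos (by omega)]; omega
  · rw [PySem.Int.floordiv_eq_ediv_of_pos (by omega)]; omega

def solveFormular_alt (List_ : List String) (index : Int) (count : Int) : Int × Int :=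
  pvLoop List_ 1 0 index count

-- ===== PRECONDITION & SPEC =====
def pvParseOk (List_ : List String) (i : Int) : Bool :=
  match PySem.List.pyGet? List_ i with
  | none => false
  | some s =>
    let toks := PySem.Str.split₀ s
    match PySem.List.pyGet? toks 0, PySem.List.pyGet? toks 1 with
    | some t0, some t1 => (PySem.Int.ofStr? t0).isSome && (PySem.Int.ofStr? t1).isSome
    | _, _ => false

-- A raises for negative count (infinite recursion) and whenever a visited element (index + j for each
-- set bit j of count) is out of range, has fewer than two whitespace tokens, or a token is not an int.
def Pre_solveFormular (List_ : List String) (index : Int) (count : Int) : Prop :=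
  0 ≤ count ∧ ∀ j ∈ List.range 32, count.toNat.testBit j = true → pvParseOk List_ (index + j) = true
instance (List_ : List String) (index : Int) (count : Int) : Decidable (Pre_solveFormular List_ index count) := by unfold Pre_solveFormular; infer_instance

def pvWitness_solveFormular : List String × Int × Int := (["2 3", "4 5"], 0, 3)

def Spec_solveFormular (List_ : List String) (index : Int) (count : Int) (out : Int × Int) : Prop := out = solveFormular_alt List_ index count
instance (List_ : List String) (index : Int) (count : Int) (out : Int × Int) : Decidable (Spec_solveFormular List_ index count out) := by unfold Spec_solveFormular; infer_instance

-- ===== CLAIM (what is proved, stated in full; the proofs are below) =====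
def Claim_equal_solveFormular : Prop := ∀ (List_ : List String) (index : Int) (count : Int), Dom_solveFormular List_ index count → Pre_solveFormular List_ index count → Spec_solveFormular List_ index count (solveFormular List_ index count)


-- ===== LEMMAS AND PROOFS =====

-- loop invariant: the iterative loop folds A's recursive result into its accumulators
lemma pvLoop_eq (List_ : List String) :
    ∀ (n : Nat) (count : Int), count.toNat ≤ n → ∀ (s b i : Int),
      pvLoop List_ s b i count = (s * (solveFormular List_ i count).1, b + (solveFormular List_ i count).2) := by
  intro n
  induction n with
  | zero =>
    intro count hc s b i
    have hle : count ≤ 0 := by omega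
    rw [pvLoop, solveFormular]
    rcases eq_or_lt_of_le hle with h | h
    · simp [h]
    · simp [show ¬ count > 0 by omega, show ¬ count = 0 by omega, h]
  | succ n ih =>
    intro count hc s b i
    by_cases hpos : count > 0
    · have hhalf : (PySem.Int.floordiv count 2).toNat ≤ n := by
        rw [PySem.Int.floordiv_eq_ediv_of_pos (by omega)]; omega
      rw [pvLoop, solveFormular]
      simp only [hpos, if_true, show ¬ count = 0 by omega, if_false, show ¬ count < 0 by omega, if_false]
      by_cases hm : PySem.Int.mod count 2 = 1
      · simp only [hm, if_true]
        rw [ih _ hhalf]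
        rw [Prod.mk.injEq]; constructor <;> ring
      · simp only [hm, if_false]
        rw [ih _ hhalf]
    · rw [pvLoop, solveFormular]
      rcases eq_or_lt_of_le (show count ≤ 0 by omega) with h | h
      · simp [h]
      · simp [hpos, show ¬ count = 0 by omega, h]

-- ===== VERDICT (by name: the statement is the Claim_ definition above) =====
theorem solveFormular_spec : Claim_equal_solveFormular := by
  intro List_ index count _ _
  unfold Spec_solveFormular solveFormular_alt
  rw [pvLoop_eq List_ count.toNat count le_rfl]
  simp
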